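-- pv_equiv track=rewrite | github.com/cjfgml123/python_codingTest | programmers_level1/부족한금액더하기.py | solution
-- ===== SOURCE A (Python) =====
-- def solution(price, money, count):
--     _sumVal = 0
--     for i in range(1,count+1):
--         _sumVal += price * i
--
--     if money - _sumVal > 0:
--         return 0
--     else:
--         return abs(money - _sumVal)
-- ===== SOURCE B (Python) =====
-- def solution(price, money, count):
--     if count > 0:
--         total = price * count * (count + 1) // 2
--     else:
--         total = 0
--     return max(0, total - money)
-- ===== Notes on version B (the rewrite author's own statement) =====
-- stated objective: faster
-- what changed: Replaces the O(count) accumulation loop by the closed-form triangular-number sum price*count*(count+1)//2 and expresses the shortfall as max(0, total - money).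
import Mathlib
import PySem

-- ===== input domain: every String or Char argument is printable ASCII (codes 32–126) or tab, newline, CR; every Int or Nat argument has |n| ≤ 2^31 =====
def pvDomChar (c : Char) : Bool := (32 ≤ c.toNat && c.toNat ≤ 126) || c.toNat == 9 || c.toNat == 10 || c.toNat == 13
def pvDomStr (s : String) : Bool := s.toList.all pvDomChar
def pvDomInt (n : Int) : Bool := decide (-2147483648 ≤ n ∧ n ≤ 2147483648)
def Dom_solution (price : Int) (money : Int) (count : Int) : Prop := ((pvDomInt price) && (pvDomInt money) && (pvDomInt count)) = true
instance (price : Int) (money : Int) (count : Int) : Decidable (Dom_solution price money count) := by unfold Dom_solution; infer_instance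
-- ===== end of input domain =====

-- B replaces A's O(count) summation loop by the closed-form triangular sum price*count*(count+1)//2 (faster, asymptotic).


-- ===== PORT A =====
def solution (price : Int) (money : Int) (count : Int) : Int :=
  let sumVal : Int := (PySem.List.pyRange 1 (count + 1) 1).foldl (fun s i => s + price * i) 0
  if money - sumVal > 0 then 0 else |money - sumVal|

-- ===== PORT B =====
def solution_alt (price : Int) (money : Int) (count : Int) : Int :=
  let total : Int := if count > 0 then PySem.Int.floordiv (price * count * (count + 1)) 2 else 0
  max 0 (total - money)

-- ===== PRECONDITION & SPEC =====
def Spec_solution (price : Int) (money : Int) (count : Int) (out : Int) : Prop := out = solution_alt price money count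
instance (price : Int) (money : Int) (count : Int) (out : Int) : Decidable (Spec_solution price money count out) := by unfold Spec_solution; infer_instance

-- ===== CLAIM (what is proved, stated in full; the proofs are below) =====
def Claim_equal_solution : Prop := ∀ (price : Int) (money : Int) (count : Int), Dom_solution price money count → Spec_solution price money count (solution price money count)

-- ===== LEMMAS AND PROOFS =====

theorem sum_loop_two (price : Int) : ∀ (n : ℕ),
    ((PySem.List.pyRange 1 ((n : Int) + 1) 1).foldl (fun s i => s + price * i) 0) * 2
      = price * n * (n + 1) := by
  intro n
  induction n with
  | zero => simp [PySem.List.pyRange_one_eq_nil (by omega : (1:Int) ≤ 1)]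
  | succ k ih =>
      have h : PySem.List.pyRange 1 (((k + 1 : ℕ) : Int) + 1) 1
          = PySem.List.pyRange 1 ((k : Int) + 1) 1 ++ [(k : Int) + 1] := by
        have := PySem.List.pyRange_one_succ_right (a := 1) (b := (k : Int) + 1) (by omega)
        push_cast
        push_cast at this
        exact this
      rw [h, List.foldl_append]
      simp only [List.foldl]
      push_cast
      push_cast at ih
      nlinarith [ih]

theorem loop_eq_closed (price count : Int) :
    ((PySem.List.pyRange 1 (count + 1) 1).foldl (fun s i => s + price * i) 0)
      = if count > 0 then PySem.Int.floordiv (price * count * (count + 1)) 2 else 0 := by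
  by_cases hc : count > 0
  · simp only [hc, if_pos]
    obtain ⟨n, hn⟩ : ∃ n : ℕ, count = (n : Int) := ⟨count.toNat, by omega⟩
    subst hn
    have h2 := sum_loop_two price n
    rw [← h2]
    unfold PySem.Int.floordiv
    rw [Int.mul_fdiv_cancel _ (by norm_num)]
  · rw [if_neg hc]
    rw [PySem.List.pyRange_one_eq_nil (by omega)]
    simp

-- ===== VERDICT (by name: the statement is the Claim_ definition above) =====
theorem solution_spec : Claim_equal_solution := by
  intro price money count _
  unfold Spec_solution solution solution_alt
  simp only [loop_eq_closed]
  set T : Int := if count > 0 then PySem.Int.floordiv (price * count * (count + 1)) 2 else 0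
  by_cases h : money - T > 0
  · rw [if_pos h]
    omega
  · rw [if_neg h]
    rw [abs_of_nonpos (by omega)]
    omega
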